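-- pv_equiv track=rewrite | github.com/dcaguiar/PaP | lab03/test.py | uniaolistas
-- ===== SOURCE A (Python) =====
-- def head(x):
--     return x[0]
--
-- def tail(x):
--     return x[1:]
--
-- def tamanhoLista(l1): # Q13
--     if (l1 == []):
--         return 0
--     else:
--         return 1 + tamanhoLista(tail(l1))
--
-- def pertenceLista(x,lista):
--     if (tamanhoLista(lista) == 0):
--         return False
--     elif (x == head(lista)):
--         return True
--     else:
--         return pertenceLista(x,tail(lista))
--
-- def uniaolistas(l1,l2):
--     if (l1 == [] and l2 == []):
--         return []
--     elif (l1 == []):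
--         return uniaolistas(l2,[])
--     elif pertenceLista(head(l1),tail(l1)) or pertenceLista(head(l1),l2):
--         return uniaolistas(tail(l1),l2)
--     else:
--         return [head(l1)] + uniaolistas(tail(l1),l2)
-- ===== SOURCE B (Python) =====
-- def uniaolistas(l1, l2):
--     seen = set()
--     out = []
--     for x in reversed(l1 + l2):
--         if x not in seen:
--             seen.add(x)
--             out.append(x)
--     out.reverse()
--     return out
-- ===== Notes on version B (the rewrite author's own statement) =====
-- stated objective: faster
-- what changed: Replaces A's recursive union (which re-scans the rest of l1 and all of l2 with a recursive length-based membership test at every element, then recurses again to dedup l2) with a single right-to-left pass over l1+l2 that keeps a hash seen-set, emits unseen elements and reverses the result.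
import Mathlib
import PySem

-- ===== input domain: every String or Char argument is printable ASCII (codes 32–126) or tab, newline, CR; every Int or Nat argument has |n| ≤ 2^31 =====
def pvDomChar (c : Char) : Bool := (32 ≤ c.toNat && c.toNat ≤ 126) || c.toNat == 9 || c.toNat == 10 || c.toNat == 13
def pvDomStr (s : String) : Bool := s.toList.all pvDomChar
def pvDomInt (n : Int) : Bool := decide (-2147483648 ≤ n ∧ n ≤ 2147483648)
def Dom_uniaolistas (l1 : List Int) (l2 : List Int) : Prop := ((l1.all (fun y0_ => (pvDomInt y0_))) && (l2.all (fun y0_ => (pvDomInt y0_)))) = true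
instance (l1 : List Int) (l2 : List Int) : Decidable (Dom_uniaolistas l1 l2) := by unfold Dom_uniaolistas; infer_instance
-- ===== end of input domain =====

-- B replaces A's recursive O(n^3) union (membership via recursive scans, re-checked at every step)
-- with a single right-to-left pass over l1+l2 carrying a seen-set; objective: faster (asymptotic).

-- ===== PORT A =====
-- pertenceLista; its guard 'tamanhoLista lista == 0' (a recursive length) holds exactly on [],
-- transcribed as the [] match arm
def pvPertence (x : Int) : List Int → Bool
  | [] => false
  | h :: t => if x = h then true else pvPertence x t

def uniaolistas (l1 : List Int) (l2 : List Int) : List Int :=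
  match l1, l2 with
  | [], [] => []
  | [], h2 :: t2 => uniaolistas (h2 :: t2) []
  | h :: t, l2 =>
      if pvPertence h t || pvPertence h l2 then uniaolistas t l2
      else h :: uniaolistas t l2
termination_by l1.length + 2 * l2.length
decreasing_by all_goals first | (simp; omega) | simp

-- ===== PORT B =====
-- loop body: if x not in seen: seen.add(x); out.append(x)
def pvStep (st : PySem.Set Int × List Int) (x : Int) : PySem.Set Int × List Int :=
  if PySem.Set.contains st.1 x then st else (PySem.Set.add st.1 x, st.2 ++ [x])

def uniaolistas_alt (l1 : List Int) (l2 : List Int) : List Int :=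
  (((l1 ++ l2).reverse).foldl pvStep (PySem.Set.empty, [])).2.reverse

-- ===== PRECONDITION & SPEC =====
def Spec_uniaolistas (l1 : List Int) (l2 : List Int) (out : List Int) : Prop := out = uniaolistas_alt l1 l2
instance (l1 : List Int) (l2 : List Int) (out : List Int) : Decidable (Spec_uniaolistas l1 l2 out) := by unfold Spec_uniaolistas; infer_instance

-- ===== CLAIM (what is proved, stated in full; the proofs are below) =====
def Claim_equal_uniaolistas : Prop := ∀ (l1 : List Int) (l2 : List Int), Dom_uniaolistas l1 l2 → Spec_uniaolistas l1 l2 (uniaolistas l1 l2)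

-- ===== LEMMAS AND PROOFS =====

-- keep-last-occurrence dedup: the common specification of both ports
def pvLD : List Int → List Int
  | [] => []
  | x :: t => if x ∈ t then pvLD t else x :: pvLD t

theorem pvPertence_iff (x : Int) (l : List Int) : pvPertence x l = true ↔ x ∈ l := by
  induction l with
  | nil => simp [pvPertence]
  | cons h t ih => by_cases hx : x = h <;> simp [pvPertence, hx, ih]

theorem uniaolistas_eq_pvLD (l1 l2 : List Int) : uniaolistas l1 l2 = pvLD (l1 ++ l2) := by
  fun_induction uniaolistas l1 l2 with
  | case1 => rfl
  | case2 h2 t2 ih => simpa using ih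
  | case3 h t l2 hcond ih =>
      rcases Bool.or_eq_true_iff.mp hcond with hc | hc
      · simp [pvLD, List.mem_append, (pvPertence_iff h t).mp hc, ih]
      · simp [pvLD, List.mem_append, (pvPertence_iff h l2).mp hc, ih]
  | case4 h t l2 hcond ih =>
      have h1 : ¬ h ∈ t := fun hm => hcond (by simp [(pvPertence_iff h t).mpr hm])
      have h2 : ¬ h ∈ l2 := fun hm => hcond (by simp [(pvPertence_iff h l2).mpr hm])
      simp [pvLD, List.mem_append, h1, h2, ih]

theorem pvSeen_mem (l : List Int) (s : PySem.Set Int) (o : List Int) (x : Int) :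
    x ∈ (l.foldl pvStep (s, o)).1 ↔ x ∈ s ∨ x ∈ l := by
  induction l generalizing s o with
  | nil => simp
  | cons h t ih =>
      rw [List.foldl_cons]
      by_cases hc : h ∈ s
      · have hstep : pvStep (s, o) h = (s, o) := by
          simp [pvStep, PySem.Set.contains, hc]
        rw [hstep, ih]
        simp only [List.mem_cons]
        by_cases hxh : x = h
        · subst hxh; tauto
        · tauto
      · have hstep : pvStep (s, o) h = (PySem.Set.add s h, o ++ [h]) := by
          simp [pvStep, PySem.Set.contains, hc]
        rw [hstep, ih]
        simp only [List.mem_cons, PySem.Set.mem_add]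
        tauto

theorem pvFold_eq_pvLD (l : List Int) :
    (l.reverse.foldl pvStep (PySem.Set.empty, [])).2 = (pvLD l).reverse := by
  induction l with
  | nil => rfl
  | cons x t ih =>
      have hrev : (x :: t).reverse = t.reverse ++ [x] := by simp
      rw [hrev, List.foldl_append, List.foldl_cons, List.foldl_nil]
      have hmem : (x ∈ (t.reverse.foldl pvStep (PySem.Set.empty, [])).1) ↔ x ∈ t := by
        rw [pvSeen_mem]; simp [PySem.Set.empty]
      by_cases hx : x ∈ t
      · have hct : PySem.Set.contains (t.reverse.foldl pvStep (PySem.Set.empty, [])).1 x = true := by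
          rw [PySem.Set.contains_iff]; exact hmem.mpr hx
        have hstep : pvStep (t.reverse.foldl pvStep (PySem.Set.empty, [])) x
            = t.reverse.foldl pvStep (PySem.Set.empty, []) := by
          simp only [pvStep, hct, if_true]
        rw [hstep, ih, pvLD, if_pos hx]
      · have hct : PySem.Set.contains (t.reverse.foldl pvStep (PySem.Set.empty, [])).1 x = false := by
          rw [Bool.eq_false_iff]
          intro h
          rw [PySem.Set.contains_iff] at h; exact hx (hmem.mp h)
        have hstep : pvStep (t.reverse.foldl pvStep (PySem.Set.empty, [])) x
            = (PySem.Set.add (t.reverse.foldl pvStep (PySem.Set.empty, [])).1 x,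
               (t.reverse.foldl pvStep (PySem.Set.empty, [])).2 ++ [x]) := by
          simp only [pvStep, hct, Bool.false_eq_true, if_false]
        rw [hstep]
        simp only [ih, pvLD, if_neg hx, List.reverse_cons]
-- ===== VERDICT (by name: the statement is the Claim_ definition above) =====
theorem uniaolistas_spec : Claim_equal_uniaolistas := by
  intro l1 l2 _
  unfold Spec_uniaolistas uniaolistas_alt
  rw [pvFold_eq_pvLD, List.reverse_reverse, uniaolistas_eq_pvLD]
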